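-- pv_equiv track=rewrite | github.com/xielab2017/research-hub | design/evaluator.py | calculate_instability_index
-- ===== SOURCE A (Python) =====
-- def calculate_instability_index(sequence: str) -> float:
--     """
--     计算不稳定指数 (DIU)
--     < 40: 稳定, > 40: 不稳定
--     """
--     # 简化版本 - 基于氨基酸组成
--     unstable = set('RKEDQN')  # 不稳定氨基酸
--     stable = set('AVLIMCFYWHGT')  # 稳定氨基酸
--
--     di = 0
--     for aa in sequence:
--         if aa in unstable:
--             di += 1
--         elif aa in stable:
--             di -= 1
--
--     # 规范化到 0-100
--     score = 50 + di * 2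
--     return max(0, min(100, score))
-- ===== SOURCE B (Python) =====
-- def calculate_instability_index(sequence: str) -> float:
--     """
--     计算不稳定指数 (DIU) — frequency-table reformulation:
--     tally the sequence once into a dict, then sum tallies over the
--     fixed alphabets (unstable minus stable) instead of branching per char.
--     """
--     freq = {}
--     for aa in sequence:
--         freq[aa] = freq.get(aa, 0) + 1
--     di = sum(freq.get(c, 0) for c in 'RKEDQN') \
--        - sum(freq.get(c, 0) for c in 'AVLIMCFYWHGT')
--     return max(0, min(100, 50 + 2 * di))
-- ===== Notes on version B (the rewrite author's own statement) =====
-- stated objective: alternative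
-- what changed: B first builds a frequency table of the sequence (a hand-rolled Counter dict), then computes di by iterating over the fixed 18-letter alphabet summing tallies (unstable minus stable), replacing A's per-character +1/-1 branch on set membership; the clamp max(0, min(100, 50 + 2*di)) is unchanged.
import Mathlib
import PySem

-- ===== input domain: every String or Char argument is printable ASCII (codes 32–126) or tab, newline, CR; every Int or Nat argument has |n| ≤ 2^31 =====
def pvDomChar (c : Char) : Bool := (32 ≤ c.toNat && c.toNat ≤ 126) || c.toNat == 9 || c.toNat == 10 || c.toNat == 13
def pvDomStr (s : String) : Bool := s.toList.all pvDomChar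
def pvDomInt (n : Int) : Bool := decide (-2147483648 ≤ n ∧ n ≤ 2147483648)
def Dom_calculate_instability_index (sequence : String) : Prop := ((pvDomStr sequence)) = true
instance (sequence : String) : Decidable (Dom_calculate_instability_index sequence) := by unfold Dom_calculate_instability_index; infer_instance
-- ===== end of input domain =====

-- B builds a frequency table of the sequence first, then sums tallies over the fixed alphabets (alternative decomposition, same cost).

-- ===== PORT A =====
def calculate_instability_index (sequence : String) : Int :=
  let unstable := PySem.Set.ofList ['R','K','E','D','Q','N']
  let stable := PySem.Set.ofList ['A','V','L','I','M','C','F','Y','W','H','G','T']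
  let di := sequence.toList.foldl
    (fun di aa => if aa ∈ unstable then di + 1 else if aa ∈ stable then di - 1 else di) (0 : Int)
  max 0 (min 100 (50 + di * 2))

-- ===== PORT B =====
-- freq[aa] = freq.get(aa, 0) + 1  ↦  Dict.modify aa 0 (· + 1)
def calculate_instability_index_alt (sequence : String) : Int :=
  let freq : PySem.Dict Char Int :=
    sequence.toList.foldl (fun d aa => d.modify aa 0 (· + 1)) PySem.Dict.empty
  let di : Int :=
      (['R','K','E','D','Q','N'].foldl (fun s c => s + freq.getD c 0) 0)
    - (['A','V','L','I','M','C','F','Y','W','H','G','T'].foldl (fun s c => s + freq.getD c 0) 0)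
  max 0 (min 100 (50 + 2 * di))

-- ===== PRECONDITION & SPEC =====
def Spec_calculate_instability_index (sequence : String) (out : Int) : Prop := out = calculate_instability_index_alt sequence
instance (sequence : String) (out : Int) : Decidable (Spec_calculate_instability_index sequence out) := by unfold Spec_calculate_instability_index; infer_instance

-- ===== CLAIM =====
def Claim_equal_calculate_instability_index : Prop := ∀ (sequence : String), Dom_calculate_instability_index sequence → Spec_calculate_instability_index sequence (calculate_instability_index sequence)

-- ===== LEMMAS AND PROOFS =====

def pvU : List Char := ['R','K','E','D','Q','N']
def pvS : List Char := ['A','V','L','I','M','C','F','Y','W','H','G','T']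

-- B's alphabet fold of tallies equals the sum of character counts in l
theorem pvFold_counts (L l : List Char) (s : Int) :
    L.foldl (fun s c =>
        s + (l.foldl (fun d aa => d.modify aa 0 (· + 1)) PySem.Dict.empty).getD c 0) s
      = s + (L.map (fun c => (l.count c : Int))).sum := by
  induction L generalizing s with
  | nil => simp
  | cons c L ih =>
    have hc : (l.foldl (fun d aa => d.modify aa 0 (· + 1)) PySem.Dict.empty).getD c 0
        = (l.count c : Int) := by
      rw [← PySem.Dict.counter_eq_foldl, PySem.Dict.getD_counter]
    simp only [List.foldl_cons, List.map_cons, List.sum_cons, ih, hc]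
    ring

def pvSumCounts (L l : List Char) : Int := (L.map (fun c => (l.count c : Int))).sum

theorem pvSumCounts_cons (L l : List Char) (x : Char) :
    pvSumCounts L (x :: l) = pvSumCounts L l + (L.count x : Int) := by
  induction L with
  | nil => simp [pvSumCounts]
  | cons c L ih =>
    simp only [pvSumCounts, List.map_cons, List.sum_cons] at *
    rw [ih, List.count_cons, List.count_cons]
    by_cases h : x = c
    · subst h; simp; ring
    · simp [h, Ne.symm h]; ring

theorem pvStep_eq (x : Char) :
    (if x ∈ PySem.Set.ofList pvU then (1:Int) else if x ∈ PySem.Set.ofList pvS then -1 else 0)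
      = (pvU.count x : Int) - (pvS.count x : Int) := by
  by_cases hu : x ∈ PySem.Set.ofList pvU
  · have hu' : x ∈ pvU := by simpa using (PySem.Set.mem_ofList pvU x).mp hu
    have hs : x ∉ pvS := by
      simp only [pvU, List.mem_cons, List.not_mem_nil, or_false] at hu'
      rcases hu' with rfl|rfl|rfl|rfl|rfl|rfl <;> decide
    have h1 : pvU.count x = 1 := List.count_eq_one_of_mem (by decide) hu'
    have h2 : pvS.count x = 0 := List.count_eq_zero_of_not_mem hs
    simp [hu, h1, h2]
  · have hu' : x ∉ pvU := fun h => hu ((PySem.Set.mem_ofList pvU x).mpr h)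
    have h1 : pvU.count x = 0 := List.count_eq_zero_of_not_mem hu'
    by_cases hs : x ∈ PySem.Set.ofList pvS
    · have hs' : x ∈ pvS := (PySem.Set.mem_ofList pvS x).mp hs
      have h2 : pvS.count x = 1 := List.count_eq_one_of_mem (by decide) hs'
      simp [hu, hs, h1, h2]
    · have hs' : x ∉ pvS := fun h => hs ((PySem.Set.mem_ofList pvS x).mpr h)
      have h2 : pvS.count x = 0 := List.count_eq_zero_of_not_mem hs'
      simp [hu, hs, h1, h2]

-- A's accumulator characterised by count sums
theorem pvLoop_eq (l : List Char) (d : Int) :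
    l.foldl (fun di aa => if aa ∈ PySem.Set.ofList ['R','K','E','D','Q','N'] then di + 1
                          else if aa ∈ PySem.Set.ofList ['A','V','L','I','M','C','F','Y','W','H','G','T'] then di - 1 else di) d
      = d + pvSumCounts pvU l - pvSumCounts pvS l := by
  show l.foldl (fun di aa => if aa ∈ PySem.Set.ofList pvU then di + 1
                          else if aa ∈ PySem.Set.ofList pvS then di - 1 else di) d
      = d + pvSumCounts pvU l - pvSumCounts pvS l
  induction l generalizing d with
  | nil => simp [pvSumCounts]
  | cons x l ih =>
    simp only [List.foldl_cons]
    rw [ih, pvSumCounts_cons, pvSumCounts_cons]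
    have h := pvStep_eq x
    by_cases hu : x ∈ PySem.Set.ofList pvU
    · simp only [hu, if_true] at h ⊢; omega
    · by_cases hs : x ∈ PySem.Set.ofList pvS
      · simp only [hu, hs, if_true, if_false] at h ⊢; omega
      · simp only [hu, hs, if_false] at h ⊢; omega

-- ===== VERDICT =====
theorem calculate_instability_index_spec : Claim_equal_calculate_instability_index := by
  intro sequence _
  unfold Spec_calculate_instability_index calculate_instability_index calculate_instability_index_alt
  dsimp only
  rw [pvLoop_eq sequence.toList 0]
  rw [show (['R','K','E','D','Q','N'] : List Char) = pvU from rfl,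
      show (['A','V','L','I','M','C','F','Y','W','H','G','T'] : List Char) = pvS from rfl,
      pvFold_counts pvU sequence.toList 0, pvFold_counts pvS sequence.toList 0]
  simp only [pvSumCounts]
  ring_nf
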